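-- pv_equiv track=rewrite | github.com/Aditya-Bhargav-dev/Ds-Algo | Interview bit/Arrays/balance_array.py | solve
-- ===== SOURCE A (Python) =====
-- def solve(A):
--     pre = []
--     post = [0]*len(A)
--     val = 0
--     for i in range(len(A)):
--         if i % 2 == 0:
--             val  += A[i]
--         else:
--             val -=  A[i]
--         pre.append(val)
--
--     val  = 0
--     for i in range(len(A) - 1, -1, -1):
--         if i % 2 == 0:
--             val += A[i]
--         else:
--             val -= A[i]
--         post[i] = val
--
--     count = 0
--     for i in range(0, len(A)):
--         if pre[i] == post[i]:
--             count += 1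
--
--     return count
-- ===== SOURCE B (Python) =====
-- def solve(A):
--     T = 0
--     for i, a in enumerate(A):
--         T += a if i % 2 == 0 else -a
--     prev = 0
--     count = 0
--     for i, a in enumerate(A):
--         cur = prev + (a if i % 2 == 0 else -a)
--         if cur == T - prev:
--             count += 1
--         prev = cur
--     return count
-- ===== Notes on version B (the rewrite author's own statement) =====
-- stated objective: simpler
-- what changed: Eliminates the suffix array and the backward pass via the identity post[i] = T - pre[i-1]: B computes the total alternating sum T once, then a single forward pass keeps only the running prefix sum and counts indices where cur == T - prev, using O(1) extra space instead of two auxiliary arrays.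
import Mathlib
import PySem

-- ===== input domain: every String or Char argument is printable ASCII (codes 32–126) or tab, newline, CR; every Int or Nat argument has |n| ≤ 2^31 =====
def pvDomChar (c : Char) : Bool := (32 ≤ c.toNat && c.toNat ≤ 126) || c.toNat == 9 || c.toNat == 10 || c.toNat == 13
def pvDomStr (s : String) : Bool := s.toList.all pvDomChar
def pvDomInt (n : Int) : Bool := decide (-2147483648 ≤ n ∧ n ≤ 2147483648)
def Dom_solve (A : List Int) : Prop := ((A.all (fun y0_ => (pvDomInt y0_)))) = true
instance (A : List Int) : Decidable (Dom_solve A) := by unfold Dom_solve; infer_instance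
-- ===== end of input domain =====

-- B replaces the suffix array and backward pass with the identity post[i] = T - pre[i-1],
-- keeping only the running prefix alternating sum (simpler, O(1) extra space).


-- ===== PORT A =====
def solve (A : List Int) : Int :=
  let pre := ((PySem.List.pyRange 0 (A.length : Int) 1).foldl
    (fun (s : Int × List Int) i =>
      let val := if PySem.Int.mod i 2 == 0 then s.1 + PySem.List.pyGetD A i 0
                 else s.1 - PySem.List.pyGetD A i 0
      (val, s.2 ++ [val])) (0, [])).2
  let post := ((PySem.List.pyRange ((A.length : Int) - 1) (-1) (-1)).foldl
    (fun (s : Int × List Int) i =>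
      let val := if PySem.Int.mod i 2 == 0 then s.1 + PySem.List.pyGetD A i 0
                 else s.1 - PySem.List.pyGetD A i 0
      (val, PySem.List.pySetD s.2 i val)) (0, List.replicate A.length (0 : Int))).2
  (PySem.List.pyRange 0 (A.length : Int) 1).foldl
    (fun (count : Int) i =>
      if PySem.List.pyGetD pre i 0 == PySem.List.pyGetD post i 0 then count + 1 else count) 0

-- ===== PORT B =====
def solve_alt (A : List Int) : Int :=
  let T := (PySem.List.enumerate A 0).foldl
    (fun (t : Int) p => t + (if PySem.Int.mod p.1 2 == 0 then p.2 else -p.2)) 0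
  ((PySem.List.enumerate A 0).foldl
    (fun (s : Int × Int) p =>
      let cur := s.1 + (if PySem.Int.mod p.1 2 == 0 then p.2 else -p.2)
      (cur, if cur == T - s.1 then s.2 + 1 else s.2)) (0, 0)).2

-- ===== PRECONDITION & SPEC =====
def Spec_solve (A : List Int) (out : Int) : Prop := out = solve_alt A
instance (A : List Int) (out : Int) : Decidable (Spec_solve A out) := by unfold Spec_solve; infer_instance

-- ===== CLAIM (what is proved, stated in full; the proofs are below) =====
def Claim_equal_solve : Prop := ∀ (A : List Int), Dom_solve A → Spec_solve A (solve A)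

-- ===== LEMMAS AND PROOFS =====

-- alternating prefix sum of the first n elements (even absolute index adds, odd subtracts)
def pres (A : List Int) : Nat → Int
  | 0 => 0
  | n + 1 => pres A n + (if n % 2 = 0 then A.getD n 0 else -(A.getD n 0))

theorem pres_stable (A : List Int) (n : Nat) (h : A.length ≤ n) :
    pres A n = pres A A.length := by
  induction n with
  | zero => have : A.length = 0 := by omega
            rw [this]
  | succ k ih =>
    rcases Nat.lt_or_ge A.length (k+1) with h1 | h1
    · have hk : A.length ≤ k := by omega
      simp [pres, List.getD_eq_getElem?_getD, List.getElem?_eq_none (by omega : A.length ≤ k), ih hk]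
    · have : A.length = k + 1 := by omega
      rw [this]

theorem stepA (A : List Int) (n : Nat) (x : Int) :
    (if PySem.Int.mod (n : Int) 2 == 0 then x + PySem.List.pyGetD A (n : Int) 0
     else x - PySem.List.pyGetD A (n : Int) 0)
    = x + (if n % 2 = 0 then A.getD n 0 else -(A.getD n 0)) := by
  have hm : PySem.Int.mod (n : Int) 2 = ((n % 2 : Nat) : Int) := by
    exact_mod_cast PySem.Int.mod_natCast n 2
  rw [hm]
  rcases Nat.mod_two_eq_zero_or_one n with h | h <;>
    simp [h, sub_eq_add_neg]

theorem preA (A : List Int) (n : Nat) :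
    (List.range n).foldl
      (fun (s : Int × List Int) (j : Nat) =>
        ((if PySem.Int.mod (j : Int) 2 == 0 then s.1 + PySem.List.pyGetD A (j : Int) 0
          else s.1 - PySem.List.pyGetD A (j : Int) 0),
         s.2 ++ [(if PySem.Int.mod (j : Int) 2 == 0 then s.1 + PySem.List.pyGetD A (j : Int) 0
          else s.1 - PySem.List.pyGetD A (j : Int) 0)])) ((0 : Int), ([] : List Int))
    = (pres A n, (List.range n).map (fun i => pres A (i+1))) := by
  induction n with
  | zero => simp [pres]
  | succ k ih =>
    rw [List.range_succ, List.foldl_append, ih]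
    simp only [List.foldl_cons, List.foldl_nil, stepA, List.map_append, List.map_cons, List.map_nil]
    simp [pres]

theorem dropSet (arr : List Int) (m : Nat) (v : Int) (h : m < arr.length) :
    (arr.set m v).drop m = v :: arr.drop (m+1) := by
  have h2 : m < (arr.set m v).length := by simpa using h
  rw [List.drop_eq_getElem_cons h2]
  simp [List.drop_set]

theorem postA (A : List Int) (m : Nat) (arr : List Int)
    (hm : m ≤ A.length) (ha : arr.length = A.length) :
    (PySem.List.pyRange ((m : Int) - 1) (-1) (-1)).foldl
      (fun (s : Int × List Int) (i : Int) =>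
        ((if PySem.Int.mod i 2 == 0 then s.1 + PySem.List.pyGetD A i 0
          else s.1 - PySem.List.pyGetD A i 0),
         PySem.List.pySetD s.2 i
           (if PySem.Int.mod i 2 == 0 then s.1 + PySem.List.pyGetD A i 0
            else s.1 - PySem.List.pyGetD A i 0)))
      (pres A A.length - pres A m, arr)
    = (pres A A.length - pres A 0,
       (List.range m).map (fun i => pres A A.length - pres A i) ++ arr.drop m) := by
  induction m generalizing arr with
  | zero =>
    rw [PySem.List.pyRange_neg_one_eq_nil (by omega)]
    simp
  | succ k ih =>
    have hcons : PySem.List.pyRange ((k:Int) + 1 - 1) (-1) (-1)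
        = (k : Int) :: PySem.List.pyRange ((k:Int) - 1) (-1) (-1) := by
      have := PySem.List.pyRange_neg_one_cons (a := (k:Int)) (b := -1) (by omega)
      simpa using this
    push_cast
    rw [hcons, List.foldl_cons]
    have hval : (if PySem.Int.mod (k:Int) 2 == 0
          then pres A A.length - pres A (k+1) + PySem.List.pyGetD A (k:Int) 0
          else pres A A.length - pres A (k+1) - PySem.List.pyGetD A (k:Int) 0)
        = pres A A.length - pres A k := by
      rw [stepA]
      simp [pres]
      ring
    simp only [hval, PySem.List.pySetD_natCast]
    rw [ih (arr.set k (pres A A.length - pres A k)) (by omega) (by simpa using ha)]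
    rw [dropSet arr k _ (by omega), List.range_succ]
    simp

theorem solveA_eq (A : List Int) :
    solve A = (List.range A.length).foldl
      (fun (c : Int) i =>
        if pres A (i+1) == pres A A.length - pres A i then c + 1 else c) 0 := by
  unfold solve
  rw [PySem.List.pyRange_zero_nat, List.foldl_map, List.foldl_map]
  have hpre := preA A A.length
  have hpost := postA A A.length (List.replicate A.length (0:Int)) (le_refl _) (by simp)
  rw [sub_self] at hpost
  have h0 : pres A 0 = 0 := rfl
  rw [h0, sub_zero] at hpost
  simp only [List.drop_replicate, Nat.sub_self, List.replicate_zero, List.append_nil] at hpost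
  rw [hpre, hpost]
  apply PySem.List.foldl_congr_mem
  intro acc j hj
  have hjlt : j < A.length := List.mem_range.mp hj
  simp only [PySem.List.pyGetD_natCast]
  rw [PySem.List.getD_map_range _ _ _ _ hjlt, PySem.List.getD_map_range _ _ _ _ hjlt]

theorem drop_facts (A : List Int) (n : Nat) (a : Int) (l' : List Int)
    (h : A.drop n = a :: l') :
    n < A.length ∧ a = A.getD n 0 ∧ l' = A.drop (n+1) := by
  have hlen : A.length - n = l'.length + 1 := by
    have := congrArg List.length h
    simpa using this
  have hn : n < A.length := by omega
  have hget : A[n]? = some a := by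
    have h0 : (A.drop n)[0]? = some a := by rw [h]; rfl
    rw [List.getElem?_drop] at h0
    simpa using h0
  refine ⟨hn, ?_, ?_⟩
  · simp [List.getD_eq_getElem?_getD, hget]
  · have : (A.drop n).tail = A.drop (n+1) := by
      rw [List.tail_drop]
    rw [h] at this
    simpa using this

theorem stepB (A : List Int) (n : Nat) (x : Int) :
    x + (if PySem.Int.mod (n : Int) 2 == 0 then A.getD n 0 else -(A.getD n 0))
    = x + (if n % 2 = 0 then A.getD n 0 else -(A.getD n 0)) := by
  have hm : PySem.Int.mod (n : Int) 2 = ((n % 2 : Nat) : Int) := by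
    exact_mod_cast PySem.Int.mod_natCast n 2
  rw [hm]
  rcases Nat.mod_two_eq_zero_or_one n with h | h <;> simp [h]

theorem TB (A : List Int) (l : List Int) (n : Nat) (t : Int) (h : l = A.drop n) :
    (PySem.List.enumerate l (n : Int)).foldl
      (fun (t : Int) p => t + (if PySem.Int.mod p.1 2 == 0 then p.2 else -p.2)) t
    = t + (pres A A.length - pres A n) := by
  induction l generalizing n t with
  | nil =>
    have hlen : A.length ≤ n := by
      have := congrArg List.length h
      simp at this; omega
    rw [pres_stable A n hlen]
    simp [PySem.List.enumerate]
  | cons a l' ih =>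
    obtain ⟨hn, ha, hl'⟩ := drop_facts A n a l' h.symm
    rw [PySem.List.enumerate_cons, List.foldl_cons]
    have : ((n : Int) + 1) = ((n + 1 : Nat) : Int) := by push_cast; ring
    rw [this, ih (n + 1) _ hl']
    subst ha
    rw [stepB]
    have hp : pres A (n + 1) = pres A n + (if n % 2 = 0 then A.getD n 0 else -(A.getD n 0)) := rfl
    rw [hp]
    ring

theorem cntB (A : List Int) (T : Int) (l : List Int) (n : Nat) (c : Int)
    (h : l = A.drop n) :
    ((PySem.List.enumerate l (n : Int)).foldl
      (fun (s : Int × Int) p =>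
        (s.1 + (if PySem.Int.mod p.1 2 == 0 then p.2 else -p.2),
         if (s.1 + (if PySem.Int.mod p.1 2 == 0 then p.2 else -p.2)) == T - s.1
         then s.2 + 1 else s.2))
      (pres A n, c)).2
    = (List.range' n (A.length - n)).foldl
        (fun (c : Int) i => if pres A (i+1) == T - pres A i then c + 1 else c) c := by
  induction l generalizing n c with
  | nil =>
    have hlen : A.length ≤ n := by
      have := congrArg List.length h
      simp at this; omega
    have : A.length - n = 0 := by omega
    rw [this]
    simp [PySem.List.enumerate]
  | cons a l' ih =>
    obtain ⟨hn, ha, hl'⟩ := drop_facts A n a l' h.symm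
    rw [PySem.List.enumerate_cons, List.foldl_cons]
    have hk : A.length - n = (A.length - (n+1)) + 1 := by omega
    rw [hk, List.range'_succ]
    rw [List.foldl_cons]
    subst ha
    have hcur : pres A n + (if PySem.Int.mod (n:Int) 2 == 0 then A.getD n 0 else -(A.getD n 0))
        = pres A (n + 1) := by
      rw [stepB]; rfl
    simp only [hcur]
    have hcast : ((n : Int) + 1) = ((n + 1 : Nat) : Int) := by push_cast; ring
    rw [hcast, ih (n + 1) _ hl']

theorem solveB_eq (A : List Int) :
    solve_alt A = (List.range A.length).foldl
      (fun (c : Int) i =>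
        if pres A (i+1) == pres A A.length - pres A i then c + 1 else c) 0 := by
  unfold solve_alt
  have hT : (PySem.List.enumerate A (0:Int)).foldl
      (fun (t : Int) p => t + (if PySem.Int.mod p.1 2 == 0 then p.2 else -p.2)) 0
      = pres A A.length := by
    have := TB A A 0 0 (by simp)
    have h0 : pres A 0 = 0 := rfl
    rw [h0, sub_zero, zero_add] at this
    simpa using this
  simp only []
  rw [hT]
  have := cntB A (pres A A.length) A 0 0 (by simp)
  have h0 : pres A 0 = 0 := rfl
  rw [h0] at this
  simp only [Nat.cast_zero] at this
  rw [this]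
  rw [Nat.sub_zero, ← List.range_eq_range']

-- ===== VERDICT (by name: the statement is the Claim_ definition above) =====
theorem solve_spec : Claim_equal_solve := by
  intro A _
  unfold Spec_solve
  rw [solveA_eq, solveB_eq]
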